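-- pv_equiv track=rewrite | github.com/sacline/collegescvis | decoder.py | read_values
-- ===== SOURCE A (Python) =====
-- def read_values(entry):
--     counts = [0, 0, 0] #values, privacy, null
--     for value in entry[1:]:
--         if value == 'NULL':
--             counts[2] += 1
--         elif value == 'PrivacySuppressed':
--             counts[1] += 1
--         else:
--             counts[0] += 1
--     return counts
-- ===== SOURCE B (Python) =====
-- def read_values(entry):
--     histogram = {}
--     for value in entry[1:]:
--         histogram[value] = histogram.get(value, 0) + 1
--     null = histogram.get('NULL', 0)
--     privacy = histogram.get('PrivacySuppressed', 0)
--     values = sum(n for key, n in histogram.items()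
--                  if key != 'NULL' and key != 'PrivacySuppressed')
--     return [values, privacy, null]
-- ===== Notes on version B (the rewrite author's own statement) =====
-- stated objective: alternative
-- what changed: Replaces A's classify-each-element branching loop with a group-by: one pass builds a histogram dict of all distinct values, and the three buckets are then read off the histogram (two key lookups plus a filtered sum over its items), with no per-element classification.
import Mathlib
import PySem

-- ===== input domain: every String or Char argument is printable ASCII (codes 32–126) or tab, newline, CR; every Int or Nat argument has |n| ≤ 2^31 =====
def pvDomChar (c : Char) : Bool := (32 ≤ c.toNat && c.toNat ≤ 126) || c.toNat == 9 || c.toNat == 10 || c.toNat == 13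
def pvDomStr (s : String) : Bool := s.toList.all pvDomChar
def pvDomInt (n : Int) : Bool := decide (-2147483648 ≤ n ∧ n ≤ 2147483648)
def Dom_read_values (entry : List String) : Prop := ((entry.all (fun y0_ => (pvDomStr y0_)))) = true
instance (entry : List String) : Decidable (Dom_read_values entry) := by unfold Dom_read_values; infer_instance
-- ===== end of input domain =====

-- B replaces A's classify-each-element loop with a histogram dict built in one pass, the three buckets then read off the histogram; objective: alternative (same cost, different structure).


-- ===== PORT A =====
-- A: counts = [values, privacy, null]; one pass classifying each element of entry[1:].
def read_values (entry : List String) : List Int :=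
  let counts : Int × Int × Int :=
    (PySem.List.slice entry (some 1) none).foldl
      (fun c value =>
        if value = "NULL" then (c.1, c.2.1, c.2.2 + 1)
        else if value = "PrivacySuppressed" then (c.1, c.2.1 + 1, c.2.2)
        else (c.1 + 1, c.2.1, c.2.2))
      (0, 0, 0)
  [counts.1, counts.2.1, counts.2.2]

-- ===== PORT B =====
-- B: histogram[value] = histogram.get(value, 0) + 1 over entry[1:], then two lookups and a filtered sum over items.
def read_values_alt (entry : List String) : List Int :=
  let histogram :=
    (PySem.List.slice entry (some 1) none).foldl
      (fun d x => d.insert x (d.getD x 0 + 1)) (PySem.Dict.empty : PySem.Dict String Int)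
  let null : Int := histogram.getD "NULL" 0
  let privacy : Int := histogram.getD "PrivacySuppressed" 0
  let values : Int :=
    ((histogram.items.filter
        (fun p => !(p.1 == "NULL") && !(p.1 == "PrivacySuppressed"))).map (fun p => p.2)).sum
  [values, privacy, null]

-- ===== PRECONDITION & SPEC =====
def Spec_read_values (entry : List String) (out : List Int) : Prop := out = read_values_alt entry
instance (entry : List String) (out : List Int) : Decidable (Spec_read_values entry out) := by unfold Spec_read_values; infer_instance

-- ===== CLAIM (what is proved, stated in full; the proofs are below) =====
def Claim_equal_read_values : Prop := ∀ (entry : List String), Dom_read_values entry → Spec_read_values entry (read_values entry)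

-- ===== LEMMAS AND PROOFS =====

-- A's fold shifts the start state by (others, privacy-count, NULL-count).
theorem read_values_fold (l : List String) (a b c : Int) :
    l.foldl
      (fun (s : Int × Int × Int) value =>
        if value = "NULL" then (s.1, s.2.1, s.2.2 + 1)
        else if value = "PrivacySuppressed" then (s.1, s.2.1 + 1, s.2.2)
        else (s.1 + 1, s.2.1, s.2.2)) (a, b, c)
    = (a + (l.length : Int) - l.count "NULL" - l.count "PrivacySuppressed",
       b + l.count "PrivacySuppressed", c + l.count "NULL") := by
  induction l generalizing a b c with
  | nil => simp
  | cons x xs ih =>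
    by_cases hx : x = "NULL"
    · subst hx
      rw [List.foldl_cons, if_pos rfl, ih]
      simp [List.count_cons, Prod.ext_iff]
      refine ⟨by push_cast; ring, by push_cast; ring⟩
    · by_cases hp : x = "PrivacySuppressed"
      · subst hp
        rw [List.foldl_cons, if_neg hx, if_pos rfl, ih]
        simp [List.count_cons, Prod.ext_iff]
        refine ⟨by push_cast; ring, by push_cast; ring⟩
      · rw [List.foldl_cons, if_neg hx, if_neg hp, ih]
        simp [List.count_cons, hx, hp, Prod.ext_iff]
        ring

-- Sum of an indicator over a list counts occurrences.
theorem sum_map_indicator (l : List String) (x : String) :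
    (l.map (fun k => if k = x then (1 : Int) else 0)).sum = (l.count x : Int) := by
  induction l with
  | nil => simp
  | cons y ys ih =>
    by_cases h : y = x
    · subst h; simp [List.count_cons, ih]; omega
    · simp [List.count_cons, h, ih]

-- Over a nodup key list covering xs, summing counts of keys satisfying p counts the elements of xs satisfying p.
theorem sum_counts_filter (p : String → Bool) (ks : List String) (hnd : ks.Nodup)
    (xs : List String) (hmem : ∀ x ∈ xs, x ∈ ks) :
    ((ks.filter p).map (fun k => (xs.count k : Int))).sum = ((xs.filter p).length : Int) := by
  induction xs with
  | nil => simp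
  | cons x rest ih =>
    have hrest : ∀ y ∈ rest, y ∈ ks := fun y hy => hmem y (List.mem_cons_of_mem _ hy)
    have hx : x ∈ ks := hmem x (List.mem_cons_self ..)
    have hsplit :
        ((ks.filter p).map (fun k => ((x :: rest).count k : Int))).sum
        = ((ks.filter p).map (fun k => (rest.count k : Int))).sum
          + ((ks.filter p).map (fun k => if k = x then (1 : Int) else 0)).sum := by
      rw [← List.sum_map_add]
      congr 1
      apply List.map_congr_left
      intro k _
      by_cases h : k = x
      · subst h; simp [List.count_cons]
      · have h' : ¬x = k := fun hh => h hh.symm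
        simp [List.count_cons, h, h']
    rw [hsplit, ih hrest, sum_map_indicator]
    have hcnt : ((ks.filter p).count x : Int) = if p x then 1 else 0 := by
      by_cases hpx : p x = true
      · simp [List.count_filter, hpx, List.count_eq_one_of_mem hnd hx]
      · simp [List.count_eq_zero, List.mem_filter, hpx]
    rw [hcnt]
    by_cases hpx : p x = true <;> simp [List.filter_cons, hpx] <;> omega

-- The three categories partition the list.
theorem length_filter_other (xs : List String) :
    ((xs.filter (fun k => !(k == "NULL") && !(k == "PrivacySuppressed"))).length : Int)
    = (xs.length : Int) - xs.count "NULL" - xs.count "PrivacySuppressed" := by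
  induction xs with
  | nil => simp
  | cons x rest ih =>
    by_cases hx : x = "NULL"
    · subst hx; simp [List.filter_cons, List.count_cons, ih] <;> push_cast <;> ring
    · by_cases hp : x = "PrivacySuppressed"
      · subst hp; simp [List.filter_cons, List.count_cons, ih] <;> push_cast <;> ring
      · simp [List.filter_cons, List.count_cons, hx, hp, ih] <;> push_cast <;> ring

-- ===== VERDICT (by name: the statement is the Claim_ definition above) =====
theorem read_values_spec : Claim_equal_read_values := by
  intro entry _
  unfold Spec_read_values read_values read_values_alt
  set l := PySem.List.slice entry (some 1) none with hl
  rw [PySem.Dict.foldl_insert_getD_add_one_eq_counter]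
  simp only [read_values_fold, PySem.Dict.getD_counter, PySem.Dict.items_counter]
  rw [List.filter_map, List.map_map]
  have := sum_counts_filter (fun k => !(k == "NULL") && !(k == "PrivacySuppressed"))
    (PySem.Set.ofList l) (PySem.Set.nodup_ofList l) l
    (fun x hx => (PySem.Set.mem_ofList ..).mpr hx)
  simp only [Function.comp_def]
  rw [this, length_filter_other]
  simp
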